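-- pv_equiv track=rewrite | github.com/wsylxy/Embedding-fusion | preprocess/formula_process.py | number_standarization
-- ===== SOURCE A (Python) =====
-- def number_standarization(num): #if number like 12.34.56 or .123 appears, convet it to similar decimal
--     result = []
--     if num[0] == '.':
--         num = '0' + num
--     dot_count = 0
--     for char in num:
--         if char == '.':
--             dot_count += 1
--             if dot_count >= 2:
--                 return ''.join(result)
--         result.append(char)
--     return ''.join(result)
-- ===== SOURCE B (Python) =====
-- def number_standarization(num):
--     if num[0] == '.':
--         num = '0' + num
--     first = num.find('.')
--     if first == -1:
--         return num
--     second = num.find('.', first + 1)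
--     if second == -1:
--         return num
--     return num[:second]
-- ===== Notes on version B (the rewrite author's own statement) =====
-- stated objective: simpler
-- what changed: Replaces the per-character accumulator loop with a dot counter by two str.find calls locating the second dot and a single slice.
import Mathlib
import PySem

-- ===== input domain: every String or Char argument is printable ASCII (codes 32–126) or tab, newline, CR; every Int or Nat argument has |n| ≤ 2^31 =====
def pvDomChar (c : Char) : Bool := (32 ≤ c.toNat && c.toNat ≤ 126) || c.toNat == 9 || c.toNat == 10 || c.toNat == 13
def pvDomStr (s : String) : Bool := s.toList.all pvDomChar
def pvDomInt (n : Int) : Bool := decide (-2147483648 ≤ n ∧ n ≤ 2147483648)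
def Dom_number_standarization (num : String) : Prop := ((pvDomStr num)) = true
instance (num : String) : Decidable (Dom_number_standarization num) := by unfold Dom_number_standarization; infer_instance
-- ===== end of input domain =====

-- B replaces A's accumulator loop and dot counter by two str.find calls and one slice (simpler decomposition, same cost).
-- Pre_ excludes only the empty string, on which A raises IndexError at num[0] (B raises there too).


-- ===== PORT A =====
-- the for-loop with `result`/`dot_count` state and the early `return` on the second dot
def nsLoop : List Char → Nat → List Char → List Char
  | [], _, result => result.reverse
  | c :: rest, dotCount, result =>
    if c = '.' then
      if dotCount + 1 ≥ 2 then result.reverse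
      else nsLoop rest (dotCount + 1) (c :: result)
    else nsLoop rest dotCount (c :: result)

def number_standarization (num : String) : String :=
  let l : List Char :=
    if PySem.Str.pyGet? num 0 = some '.' then '0' :: num.toList else num.toList
  String.ofList (nsLoop l 0 [])

-- ===== PORT B =====
def number_standarization_alt (num : String) : String :=
  let l : List Char :=
    if PySem.Str.pyGet? num 0 = some '.' then '0' :: num.toList else num.toList
  let first := PySem.Chars.find l ['.']
  if first = -1 then String.ofList l
  else
    let second := PySem.Chars.findFrom l ['.'] (first + 1) none
    if second = -1 then String.ofList l
    else String.ofList (PySem.Chars.slice l none (some second))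

-- ===== PRECONDITION & SPEC =====
-- Pre_ excludes exactly the empty string: there A raises IndexError on num[0].
def Pre_number_standarization (num : String) : Prop := num ≠ ""
instance (num : String) : Decidable (Pre_number_standarization num) := by unfold Pre_number_standarization; infer_instance
def pvWitness_number_standarization : String := "12.34.56"
def Spec_number_standarization (num : String) (out : String) : Prop := out = number_standarization_alt num
instance (num : String) (out : String) : Decidable (Spec_number_standarization num out) := by unfold Spec_number_standarization; infer_instance

-- ===== CLAIM (what is proved, stated in full; the proofs are below) =====
def Claim_equal_number_standarization : Prop := ∀ (num : String), Dom_number_standarization num → Pre_number_standarization num → Spec_number_standarization num (number_standarization num)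

-- ===== LEMMAS AND PROOFS =====


-- p is the "not a dot" predicate used throughout
def pDot : Char → Bool := (· != '.')

-- A's truncation result, as a structural recursion (proof helper)
def truncA : List Char → List Char
  | [] => []
  | c :: rest => if c = '.' then '.' :: rest.takeWhile pDot else c :: truncA rest

theorem nsLoop_one (l acc : List Char) :
    nsLoop l 1 acc = acc.reverse ++ l.takeWhile pDot := by
  induction l generalizing acc with
  | nil => simp [nsLoop]
  | cons c rest ih =>
    by_cases hc : c = '.'
    · simp [nsLoop, hc, pDot]
    · simp [nsLoop, hc, ih, pDot]

theorem nsLoop_zero (l acc : List Char) :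
    nsLoop l 0 acc = acc.reverse ++ truncA l := by
  induction l generalizing acc with
  | nil => simp [nsLoop, truncA]
  | cons c rest ih =>
    by_cases hc : c = '.'
    · simp [nsLoop, hc, truncA, nsLoop_one]
    · simp [nsLoop, hc, truncA, ih]

theorem truncA_not_mem {l : List Char} (h : '.' ∉ l) : truncA l = l := by
  induction l with
  | nil => rfl
  | cons c rest ih =>
    simp only [List.mem_cons, not_or] at h
    simp only [truncA, if_neg (show ¬c = '.' from fun hc => h.1 hc.symm), ih h.2]

theorem truncA_mem {l : List Char} (h : '.' ∈ l) :
    truncA l = l.takeWhile pDot ++ '.' :: ((l.dropWhile pDot).tail.takeWhile pDot) := by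
  induction l with
  | nil => simp at h
  | cons c rest ih =>
    by_cases hc : c = '.'
    · simp [truncA, hc, pDot]
    · have hr : '.' ∈ rest := by simpa [hc, eq_comm] using h
      simp [truncA, hc, pDot, ih hr]

theorem dw_eq {l : List Char} (h : '.' ∈ l) :
    l.dropWhile pDot = '.' :: (l.dropWhile pDot).tail := by
  induction l with
  | nil => simp at h
  | cons c rest ih =>
    by_cases hc : c = '.'
    · simp [hc, pDot]
    · have hr : '.' ∈ rest := by simpa [hc, eq_comm] using h
      simpa [pDot, hc, List.dropWhile_cons] using ih hr

theorem tw_struct {l : List Char} (h : '.' ∈ l) :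
    l = l.takeWhile pDot ++ '.' :: (l.dropWhile pDot).tail := by
  conv_lhs => rw [← List.takeWhile_append_dropWhile (p := pDot) (l := l), dw_eq h]

theorem take_tw (l : List Char) : l.take (l.takeWhile pDot).length = l.takeWhile pDot := by
  generalize hgen : l.takeWhile pDot = t
  conv_lhs => rw [← List.takeWhile_append_dropWhile (p := pDot) (l := l), hgen]
  exact List.take_left ..

theorem drop_tw (l : List Char) : l.drop (l.takeWhile pDot).length = l.dropWhile pDot := by
  generalize hgen : l.takeWhile pDot = t
  conv_lhs => rw [← List.takeWhile_append_dropWhile (p := pDot) (l := l), hgen]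
  exact List.drop_left ..

theorem singleton_prefix (c : Char) (xs : List Char) : [c] <+: xs ↔ xs.head? = some c := by
  cases xs with
  | nil => simp
  | cons a t =>
    constructor
    · rintro ⟨r, hr⟩; simp at hr; simp [hr.1]
    · intro h; simp at h; exact ⟨t, by simp [h]⟩

theorem mem_iff_infix (l : List Char) : '.' ∈ l ↔ ['.'] <:+: l := by
  constructor
  · intro h
    exact ⟨l.takeWhile pDot, (l.dropWhile pDot).tail, by simpa using (tw_struct h).symm⟩
  · intro h
    exact List.singleton_sublist.mp h.sublist

theorem find_no_dot {l : List Char} (h : '.' ∉ l) : PySem.Chars.find l ['.'] = -1 :=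
  (PySem.Chars.find_eq_neg_one_iff _ _).mpr (fun hc => h ((mem_iff_infix l).mpr hc))

theorem find_dot {l : List Char} (h : '.' ∈ l) :
    PySem.Chars.find l ['.'] = ((l.takeWhile pDot).length : Int) := by
  have hnn : 0 ≤ PySem.Chars.find l ['.'] :=
    (PySem.Chars.find_nonneg_iff _ _).mpr ((mem_iff_infix l).mp h)
  obtain ⟨hpre, hmin⟩ := PySem.Chars.find_spec hnn
  have hdropt : l.drop (l.takeWhile pDot).length = '.' :: (l.dropWhile pDot).tail := by
    rw [drop_tw, ← dw_eq h]
  have hft : (PySem.Chars.find l ['.']).toNat = (l.takeWhile pDot).length := by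
    rcases Nat.lt_trichotomy (PySem.Chars.find l ['.']).toNat (l.takeWhile pDot).length
      with h1 | h1 | h1
    · exfalso
      have hget : l[(PySem.Chars.find l ['.']).toNat]? = some '.' := by
        rw [← List.head?_drop]; exact (singleton_prefix _ _).mp hpre
      have htake : (l.takeWhile pDot)[(PySem.Chars.find l ['.']).toNat]? = some '.' := by
        rw [← take_tw l, List.getElem?_take_of_lt h1]; exact hget
      have hmem : '.' ∈ l.takeWhile pDot := List.mem_of_getElem? htake
      have := List.mem_takeWhile_imp hmem
      simp [pDot] at this
    · exact h1
    · exact absurd ((singleton_prefix _ _).mpr (by rw [List.head?_drop, ← List.head?_drop, hdropt]; rfl)) (hmin _ h1)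
  omega

theorem list_core (l : List Char) :
    nsLoop l 0 [] =
      (let first := PySem.Chars.find l ['.']
       if first = -1 then l
       else
         let second := PySem.Chars.findFrom l ['.'] (first + 1) none
         if second = -1 then l
         else PySem.Chars.slice l none (some second)) := by
  by_cases h1 : '.' ∈ l
  · obtain ⟨t1, tl, ht1, htl, hstruct⟩ :
        ∃ t1 tl, t1 = l.takeWhile pDot ∧ tl = (l.dropWhile pDot).tail ∧ l = t1 ++ '.' :: tl :=
      ⟨_, _, rfl, rfl, tw_struct h1⟩
    have hlen : t1.length + 1 ≤ l.length := by rw [hstruct]; simp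
    have hdrop1 : l.drop (t1.length + 1) = tl := by
      rw [hstruct, show t1.length + 1 = (t1 ++ ['.']).length by simp,
        show t1 ++ '.' :: tl = (t1 ++ ['.']) ++ tl by simp]
      exact List.drop_left ..
    have hfirst : PySem.Chars.find l ['.'] = (t1.length : Int) := by rw [find_dot h1, ← ht1]
    have hA : nsLoop l 0 [] = t1 ++ '.' :: tl.takeWhile pDot := by
      rw [nsLoop_zero, truncA_mem h1, ← ht1, ← htl]; simp
    have hcast : (t1.length : Int) + 1 = ((t1.length + 1 : Nat) : Int) := by push_cast; ring
    have hff := PySem.Chars.findFrom_natCast l ['.'] (t1.length + 1) hlen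
    rw [hdrop1] at hff
    by_cases h2 : '.' ∈ tl
    · have hf2 : PySem.Chars.find tl ['.'] = ((tl.takeWhile pDot).length : Int) := find_dot h2
      rw [hf2, if_neg (by omega)] at hff
      have hsum : ((t1.length + 1 : Nat) : Int) + ((tl.takeWhile pDot).length : Int)
          = ((t1.length + 1 + (tl.takeWhile pDot).length : Nat) : Int) := by push_cast; ring
      rw [hsum] at hff
      simp only [hfirst, hcast, hff]
      rw [if_neg (by omega), if_neg (by omega), hA,
        PySem.Chars.slice_eq_listSlice, PySem.List.slice_to_natCast]
      conv_rhs => rw [hstruct,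
        show t1.length + 1 + (tl.takeWhile pDot).length
           = (t1 ++ ['.']).length + (tl.takeWhile pDot).length by simp,
        show t1 ++ '.' :: tl = (t1 ++ ['.']) ++ tl by simp,
        List.take_length_add_append, take_tw]
      simp
    · have hf2 : PySem.Chars.find tl ['.'] = -1 := find_no_dot h2
      rw [hf2, if_pos rfl] at hff
      have htwtail : tl.takeWhile pDot = tl :=
        List.takeWhile_eq_self_iff.mpr (by
          intro x hx
          simp [pDot]
          exact fun hxx => h2 (hxx ▸ hx))
      simp only [hfirst, hcast, hff]
      norm_num
      rw [hA, htwtail]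
      exact hstruct.symm
  · simp only [find_no_dot h1]
    norm_num
    rw [nsLoop_zero, truncA_not_mem h1]
    simp

-- ===== VERDICT (by name: the statement is the Claim_ definition above) =====
theorem number_standarization_spec : Claim_equal_number_standarization := by
  intro num _ _
  unfold Spec_number_standarization number_standarization number_standarization_alt
  simp only []
  rw [list_core]
  simp only [apply_ite String.ofList]
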